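-- pv_equiv track=rewrite | github.com/salehafzoon/sudoku-solver-with-ga | sudokuSolver.py | calculateListFitness
-- ===== SOURCE A (Python) =====
-- FITNESS_MODE = "mode1"
--
-- def calculateListFitness(array):
--     l = list(range(1,10))
--     fitness = 0
--     for num in l:
--         if array.count(num)>1:
--             fitness += array.count(num)-1
--         elif array.count(num)== 0 and FITNESS_MODE == "mode2":
--             fitness += 1
--
--     return fitness
-- ===== SOURCE B (Python) =====
-- FITNESS_MODE = "mode1"
--
-- def calculateListFitness(array):
--     present = [x for x in array if x in range(1, 10)]
--     return len(present) - len(set(present))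
-- ===== Notes on version B (the rewrite author's own statement) =====
-- stated objective: simpler
-- what changed: Replaced the loop over the nine digits with two array.count scans per digit by a single closed form: keep the in-range elements and return total occurrences minus distinct occurrences (len(present) - len(set(present))).
import Mathlib
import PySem

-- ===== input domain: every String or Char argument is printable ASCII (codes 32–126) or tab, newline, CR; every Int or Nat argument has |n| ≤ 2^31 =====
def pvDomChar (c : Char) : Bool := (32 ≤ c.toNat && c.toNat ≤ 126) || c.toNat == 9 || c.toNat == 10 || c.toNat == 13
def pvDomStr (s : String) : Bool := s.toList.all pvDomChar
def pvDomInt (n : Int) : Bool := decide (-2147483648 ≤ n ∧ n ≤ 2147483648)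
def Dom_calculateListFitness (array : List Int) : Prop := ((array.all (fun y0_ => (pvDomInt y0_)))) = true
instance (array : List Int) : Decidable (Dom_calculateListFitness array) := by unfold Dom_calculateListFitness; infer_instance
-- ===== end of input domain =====

-- B computes the fitness in closed form — in-range occurrences minus distinct in-range values — instead of A's per-digit count loop (objective: simpler).

-- ===== PORT A =====
def calculateListFitness (array : List Int) : Int :=
  let l := PySem.List.pyRange 1 10 1
  l.foldl (fun fitness num =>
    if ((PySem.List.count array num : Int) > 1) then
      fitness + ((PySem.List.count array num : Int) - 1)
    else if ((PySem.List.count array num : Int) = 0 ∧ ("mode1" : String) = "mode2") then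
      fitness + 1
    else fitness) 0

-- ===== PORT B =====
def calculateListFitness_alt (array : List Int) : Int :=
  let present := array.filter (fun x => decide (x ∈ PySem.List.pyRange 1 10 1))
  (present.length : Int) - ((PySem.Set.ofList present).length : Int)

-- ===== PRECONDITION & SPEC =====
def Spec_calculateListFitness (array : List Int) (out : Int) : Prop := out = calculateListFitness_alt array
instance (array : List Int) (out : Int) : Decidable (Spec_calculateListFitness array out) := by unfold Spec_calculateListFitness; infer_instance

-- ===== CLAIM (what is proved, stated in full; the proofs are below) =====
def Claim_equal_calculateListFitness : Prop := ∀ (array : List Int), Dom_calculateListFitness array → Spec_calculateListFitness array (calculateListFitness array)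

-- ===== LEMMAS AND PROOFS =====

-- per-digit contribution in A's loop body (the elif arm is dead: FITNESS_MODE is "mode1")
def pvG (a : List Int) (d : Int) : Int :=
  if ((PySem.List.count a d : Int) > 1) then (PySem.List.count a d : Int) - 1 else 0

theorem pvA_foldl (arr : List Int) (ds : List Int) (init : Int) :
    ds.foldl (fun fitness num =>
      if ((PySem.List.count arr num : Int) > 1) then
        fitness + ((PySem.List.count arr num : Int) - 1)
      else if ((PySem.List.count arr num : Int) = 0 ∧ ("mode1" : String) = "mode2") then
        fitness + 1
      else fitness) init = init + (ds.map (pvG arr)).sum := by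
  induction ds generalizing init with
  | nil => simp
  | cons d t ih =>
    have hm : ¬ (("mode1" : String) = "mode2") := by decide
    simp only [List.foldl_cons, List.map_cons, List.sum_cons, ih]
    simp only [pvG, hm, and_false, if_false]
    split_ifs <;> ring

theorem pvA_eq_sum (a : List Int) :
    calculateListFitness a = ((PySem.List.pyRange 1 10 1).map (pvG a)).sum := by
  simp only [calculateListFitness]
  rw [pvA_foldl]
  ring

theorem pvG_cons (x : Int) (a : List Int) (d : Int) :
    pvG (x :: a) d = pvG a d + (if x = d ∧ x ∈ a then 1 else 0) := by
  simp only [pvG, PySem.List.count_eq, List.count_cons, beq_iff_eq]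
  by_cases hxd : x = d
  · subst hxd
    by_cases hx : x ∈ a
    · have h1 : 0 < List.count x a := List.count_pos_iff.mpr hx
      simp only [hx, and_true]
      split_ifs <;> push_cast <;> omega
    · have h0 : List.count x a = 0 := List.count_eq_zero.mpr hx
      simp [hx, h0]
  · simp [hxd]

theorem pvS_cons (ds : List Int) (hnd : ds.Nodup) (x : Int) (a : List Int) :
    (ds.map (pvG (x :: a))).sum =
      (ds.map (pvG a)).sum + (if x ∈ ds ∧ x ∈ a then 1 else 0) := by
  induction ds with
  | nil => simp
  | cons d t ih =>
    have hd : d ∉ t := (List.nodup_cons.mp hnd).1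
    have ih' := ih (List.nodup_cons.mp hnd).2
    simp only [List.map_cons, List.sum_cons, ih', pvG_cons, List.mem_cons]
    by_cases hxa : x ∈ a
    · by_cases hxd : x = d
      · subst hxd
        have hxt : x ∉ t := hd
        simp [hxa, hxt]
        ring
      · simp only [hxa, and_true, hxd, false_or, if_false]
        by_cases hxt : x ∈ t <;> simp [hxt] <;> ring
    · simp [hxa]

theorem pvA_cons (x : Int) (a : List Int) :
    calculateListFitness (x :: a) =
      calculateListFitness a + (if (1 ≤ x ∧ x < 10) ∧ x ∈ a then 1 else 0) := by
  rw [pvA_eq_sum, pvA_eq_sum, pvS_cons _ (PySem.List.nodup_pyRange_one 1 10)]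
  simp only [PySem.List.mem_pyRange_one]

-- length of removing one value from a duplicate-free list
theorem pv_len_discard {s : List Int} (hs : s.Nodup) (x : Int) :
    ((PySem.Set.discard s x).length : Int) =
      (s.length : Int) - (if x ∈ s then 1 else 0) := by
  induction s with
  | nil => simp [PySem.Set.discard]
  | cons y t ih =>
    have hy : y ∉ t := (List.nodup_cons.mp hs).1
    have ih' := ih (List.nodup_cons.mp hs).2
    simp only [PySem.Set.discard] at ih' ⊢
    rw [List.filter_cons]
    by_cases hyx : y = x
    · have hxt : x ∉ t := hyx ▸ hy
      have hflen : ((List.filter (fun z => !(z == x)) t).length : Int) = (t.length : Int) := by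
        simpa [hxt] using ih'
      simp [hyx, hflen]
    · have hk : (!(y == x)) = true := by simp [hyx]
      have hxy : ¬ (x = y) := fun h => hyx h.symm
      simp only [hk, if_true, List.length_cons, List.mem_cons, hxy, false_or]
      by_cases hx : x ∈ t <;> simp [hx] at ih' ⊢ <;> omega

theorem pvB_cons (x : Int) (a : List Int) :
    calculateListFitness_alt (x :: a) =
      calculateListFitness_alt a + (if (1 ≤ x ∧ x < 10) ∧ x ∈ a then 1 else 0) := by
  by_cases hrx : (1 ≤ x ∧ x < 10)
  · have hr : x ∈ PySem.List.pyRange 1 10 1 := PySem.List.mem_pyRange_one.mpr hrx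
    simp only [calculateListFitness_alt]
    have hfil : List.filter (fun y => decide (y ∈ PySem.List.pyRange 1 10 1)) (x :: a) =
        x :: List.filter (fun y => decide (y ∈ PySem.List.pyRange 1 10 1)) a := by
      simp [List.filter_cons]
      omega
    rw [hfil, PySem.Set.ofList_cons]
    set p := List.filter (fun y => decide (y ∈ PySem.List.pyRange 1 10 1)) a with hp
    have hmemp : x ∈ p ↔ x ∈ a :=
      ⟨fun h => (List.mem_filter.mp h).1, fun h => List.mem_filter.mpr ⟨h, by simp [hr]⟩⟩
    have hlen := pv_len_discard (PySem.Set.nodup_ofList p) x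
    rw [if_congr ((PySem.Set.mem_ofList p x).trans hmemp) rfl rfl] at hlen
    simp only [List.length_cons, hrx, true_and]
    push_cast
    omega
  · have hr : x ∉ PySem.List.pyRange 1 10 1 := fun h => hrx (PySem.List.mem_pyRange_one.mp h)
    simp only [calculateListFitness_alt]
    have hfil : List.filter (fun y => decide (y ∈ PySem.List.pyRange 1 10 1)) (x :: a) =
        List.filter (fun y => decide (y ∈ PySem.List.pyRange 1 10 1)) a := by
      simp [List.filter_cons]
      omega
    rw [hfil]
    simp [hrx]

theorem pv_main (a : List Int) : calculateListFitness a = calculateListFitness_alt a := by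
  induction a with
  | nil => decide
  | cons x t ih => rw [pvA_cons, pvB_cons, ih]

-- ===== VERDICT (by name: the statement is the Claim_ definition above) =====
theorem calculateListFitness_spec : Claim_equal_calculateListFitness := by
  intro array _
  exact pv_main array
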